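-- pv_equiv track=rewrite | github.com/RianKatoen/advent-of-code-2023 | day11/puzzle.py | find_galaxies
-- ===== SOURCE A (Python) =====
-- def find_galaxies(map: list[list[str]], inflation_factor: int = 2) -> set[tuple[int, int]]:
--     galaxies: set[tuple[int, int]] = set()
--
--     row = 0
--     for i in range(len(map)):
--         col = 0
--         for j in range(len(map[0])):
--             if map[i][j] == '#':
--                 galaxies.add((row, col))
--
--             col += (inflation_factor - 1) if map[i][j] == '0' else 1
--
--         row += (inflation_factor - 1) if map[i][0] == '0' else 1
--
--     return galaxies
-- ===== SOURCE B (Python) =====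
-- def find_galaxies(map: list[list[str]], inflation_factor: int = 2) -> set[tuple[int, int]]:
--     # Closed-form coordinates: a galaxy at raw cell (i, j) lands at
--     # (i + extra * number of '0'-starting rows above it,
--     #  j + extra * number of '0' cells to its left in its row),
--     # computed per galaxy by counting over prefixes -- no running offsets.
--     extra = inflation_factor - 2
--     width = len(map[0]) if map else 0
--     galaxies: set[tuple[int, int]] = set()
--     for i, rw in enumerate(map):
--         for j in range(width):
--             if rw[j] == '#':
--                 galaxies.add((i + extra * [rw2[0] for rw2 in map[:i]].count('0'),
--                               j + extra * rw[:j].count('0')))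
--     return galaxies
-- ===== Notes on version B (the rewrite author's own statement) =====
-- stated objective: alternative
-- what changed: A threads running row/column offsets through one fused scan; B computes each galaxy's coordinates independently by a closed form (raw index plus (inflation_factor-2) times the count of '0' markers in the prefix of its row/column), counting over slices per galaxy instead of maintaining any accumulator.
import Mathlib
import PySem

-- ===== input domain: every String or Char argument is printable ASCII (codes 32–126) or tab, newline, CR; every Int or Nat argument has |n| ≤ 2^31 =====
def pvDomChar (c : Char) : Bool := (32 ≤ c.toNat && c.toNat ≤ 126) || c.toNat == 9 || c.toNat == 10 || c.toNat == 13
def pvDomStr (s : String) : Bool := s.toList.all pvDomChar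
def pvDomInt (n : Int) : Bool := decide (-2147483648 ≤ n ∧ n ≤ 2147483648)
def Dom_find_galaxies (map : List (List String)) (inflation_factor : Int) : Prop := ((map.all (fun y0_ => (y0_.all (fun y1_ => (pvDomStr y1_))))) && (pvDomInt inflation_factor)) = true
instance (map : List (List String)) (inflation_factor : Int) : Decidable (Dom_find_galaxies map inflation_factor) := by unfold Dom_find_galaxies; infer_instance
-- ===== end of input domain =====

-- B replaces A's fused running-offset scan by per-galaxy closed-form coordinates
-- (raw index + (inflation_factor-2) * count of '0' markers in the prefix): alternative algorithm, same cost class.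


-- ===== PORT A =====
-- pyGetD is used for map[i], map[i][j], map[i][0]; inside Pre_ every such index is in range,
-- so the defaults are never consulted.
def find_galaxies (map : List (List String)) (inflation_factor : Int) : List (Int × Int) :=
  (((PySem.List.pyRange 0 (map.length : Int) 1).foldl
    (fun (st : List (Int × Int) × Int) i =>
      let inner := (PySem.List.pyRange 0 ((PySem.List.pyGetD map 0 []).length : Int) 1).foldl
        (fun (st2 : List (Int × Int) × Int) j =>
          let cell := PySem.List.pyGetD (PySem.List.pyGetD map i []) j ""
          (if cell == "#" then PySem.Set.add st2.1 (st.2, st2.2) else st2.1,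
           st2.2 + (if cell == "0" then inflation_factor - 1 else 1)))
        (st.1, 0)
      (inner.1,
       st.2 + (if PySem.List.pyGetD (PySem.List.pyGetD map i []) 0 "" == "0" then inflation_factor - 1 else 1)))
    ((PySem.Set.empty : PySem.Set (Int × Int)), 0)).1)

-- ===== PORT B =====
-- Source B: per-galaxy closed-form coordinates; map[:i] / rw[:j] are PySem.List.slice,
-- list.count is PySem.List.count (= List.count), enumerate is PySem.List.enumerate.
def find_galaxies_alt (map : List (List String)) (inflation_factor : Int) : List (Int × Int) :=
  let extra := inflation_factor - 2
  let width : Int := match map with | [] => 0 | r0 :: _ => (r0.length : Int)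
  (PySem.List.enumerate map 0).foldl
    (fun (g : PySem.Set (Int × Int)) (p : Int × List String) =>
      (PySem.List.pyRange 0 width 1).foldl
        (fun (g : PySem.Set (Int × Int)) (j : Int) =>
          if PySem.List.pyGetD p.2 j "" == "#" then
            PySem.Set.add g
              (p.1 + extra * ((((PySem.List.slice map (some 0) (some p.1)).map
                    (fun rw2 => PySem.List.pyGetD rw2 0 "")).count "0" : Nat) : Int),
               j + extra * (((PySem.List.slice p.2 (some 0) (some j)).count "0" : Nat) : Int))
          else g) g)
    (PySem.Set.empty : PySem.Set (Int × Int))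

-- ===== PRECONDITION & SPEC =====
-- A raises IndexError (map[i][j] or map[i][0]) unless the map is empty, or its first row is
-- non-empty and no row is shorter than the first row; Pre_ is exactly where A returns.
def Pre_find_galaxies (map : List (List String)) (inflation_factor : Int) : Prop :=
  map = [] ∨ (0 < (map.headD []).length ∧ ∀ rw ∈ map, (map.headD []).length ≤ rw.length)

instance (map : List (List String)) (inflation_factor : Int) : Decidable (Pre_find_galaxies map inflation_factor) := by unfold Pre_find_galaxies; infer_instance

def pvWitness_find_galaxies : List (List String) × Int := ([["#", "."], ["0", "#"]], 2)

def Spec_find_galaxies (map : List (List String)) (inflation_factor : Int) (out : List (Int × Int)) : Prop := out = find_galaxies_alt map inflation_factor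
instance (map : List (List String)) (inflation_factor : Int) (out : List (Int × Int)) : Decidable (Spec_find_galaxies map inflation_factor out) := by unfold Spec_find_galaxies; infer_instance

-- ===== CLAIM (what is proved, stated in full; the proofs are below) =====
def Claim_equal_find_galaxies : Prop := ∀ (map : List (List String)) (inflation_factor : Int), Dom_find_galaxies map inflation_factor → Pre_find_galaxies map inflation_factor → Spec_find_galaxies map inflation_factor (find_galaxies map inflation_factor)

-- ===== LEMMAS AND PROOFS =====

-- canonical per-row collection, A's shape: running column coordinate
def rowAux (step r : Int) : List String → Int → PySem.Set (Int × Int) → PySem.Set (Int × Int)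
  | [], _, g => g
  | cell :: cs, c, g =>
      rowAux step r cs (c + if cell == "0" then step else 1)
        (if cell == "#" then PySem.Set.add g (r, c) else g)

-- canonical whole-map collection, A's shape: running row coordinate
def outAux (step : Int) (w : Nat) : List (List String) → Int → PySem.Set (Int × Int) → PySem.Set (Int × Int)
  | [], _, g => g
  | rw :: rest, r, g =>
      outAux step w rest (r + if PySem.List.pyGetD rw 0 "" == "0" then step else 1)
        (rowAux step r (rw.take w) 0 g)

-- canonical per-row collection, B's shape: raw index j and '0'-count z
def rowCl (extra r : Int) : List String → Int → Int → PySem.Set (Int × Int) → PySem.Set (Int × Int)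
  | [], _, _, g => g
  | cell :: cs, j, z, g =>
      rowCl extra r cs (j + 1) (z + if cell == "0" then 1 else 0)
        (if cell == "#" then PySem.Set.add g (r, j + extra * z) else g)

-- canonical whole-map collection, B's shape: raw index i and '0'-count z of first cells
def outCl (extra : Int) (w : Nat) : List (List String) → Int → Int → PySem.Set (Int × Int) → PySem.Set (Int × Int)
  | [], _, _, g => g
  | rw :: rest, i, z, g =>
      outCl extra w rest (i + 1) (z + if PySem.List.pyGetD rw 0 "" == "0" then 1 else 0)
        (rowCl extra (i + extra * z) (rw.take w) 0 0 g)

theorem innerA_eq (step r : Int) (cells : List String) :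
    ∀ c g, (cells.foldl
      (fun (st2 : List (Int × Int) × Int) cell =>
        (if cell == "#" then PySem.Set.add st2.1 (r, st2.2) else st2.1,
         st2.2 + (if cell == "0" then step else 1))) (g, c)).1 = rowAux step r cells c g := by
  induction cells with
  | nil => intro c g; rfl
  | cons cell cs ih => intro c g; simp only [List.foldl_cons, rowAux]; exact ih _ _

theorem innerA_range (step r : Int) (rw : List String) (w : Nat) (hw : w ≤ rw.length)
    (g : PySem.Set (Int × Int)) :
    ((PySem.List.pyRange 0 ((w : Nat) : Int) 1).foldl
      (fun (st2 : List (Int × Int) × Int) j =>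
        (if PySem.List.pyGetD rw j "" == "#" then PySem.Set.add st2.1 (r, st2.2) else st2.1,
         st2.2 + (if PySem.List.pyGetD rw j "" == "0" then step else 1))) (g, 0)).1
    = rowAux step r (rw.take w) 0 g := by
  have hlen : (rw.take w).length = w := by simp [hw]
  have hcast : ((w : Nat) : Int) = (((rw.take w).length : Nat) : Int) := by rw [hlen]
  rw [hcast]
  have hc := PySem.List.foldl_congr_mem
      (PySem.List.pyRange 0 (((rw.take w).length : Nat) : Int))
      (fun (st2 : List (Int × Int) × Int) j =>
        (if PySem.List.pyGetD rw j "" == "#" then PySem.Set.add st2.1 (r, st2.2) else st2.1,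
         st2.2 + (if PySem.List.pyGetD rw j "" == "0" then step else 1)))
      (fun (st2 : List (Int × Int) × Int) j =>
        (if PySem.List.pyGetD (rw.take w) j "" == "#" then PySem.Set.add st2.1 (r, st2.2) else st2.1,
         st2.2 + (if PySem.List.pyGetD (rw.take w) j "" == "0" then step else 1)))
      (g, 0)
      (by
        intro acc j hj
        have hj' := (PySem.List.mem_pyRange_one).1 hj
        have h0 : 0 ≤ j := hj'.1
        have h1 : j < ((rw.take w).length : Int) := hj'.2
        have h2 : j < (rw.length : Int) := by
          have h3 : (rw.take w).length ≤ rw.length := by simp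
          have h4 : ((rw.take w).length : Int) ≤ (rw.length : Int) := by exact_mod_cast h3
          omega
        simp only []
        rw [PySem.List.pyGetD_eq_getElem rw "" h0 h2,
          PySem.List.pyGetD_eq_getElem (rw.take w) "" h0 h1]
        simp [List.getElem_take])
  rw [hc]
  rw [PySem.List.foldl_pyRange_zero_pyGetD' (rw.take w) ""
      (fun (st2 : List (Int × Int) × Int) cell =>
        (if cell == "#" then PySem.Set.add st2.1 (r, st2.2) else st2.1,
         st2.2 + (if cell == "0" then step else 1))) (g, 0)]
  exact innerA_eq step r (rw.take w) 0 g

theorem outerA_eq (step : Int) (w : Nat) (map' : List (List String))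
    (h : ∀ rw ∈ map', w ≤ rw.length) :
    ∀ g r, (map'.foldl
      (fun (st : List (Int × Int) × Int) (rowi : List String) =>
        (((PySem.List.pyRange 0 ((w : Nat) : Int) 1).foldl
          (fun (st2 : List (Int × Int) × Int) j =>
            (if PySem.List.pyGetD rowi j "" == "#" then PySem.Set.add st2.1 (st.2, st2.2) else st2.1,
             st2.2 + (if PySem.List.pyGetD rowi j "" == "0" then step else 1))) (st.1, 0)).1,
         st.2 + (if PySem.List.pyGetD rowi 0 "" == "0" then step else 1))) (g, r)).1
    = outAux step w map' r g := by
  induction map' with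
  | nil => intro g r; rfl
  | cons rw rest ih =>
      intro g r
      simp only [List.foldl_cons, outAux]
      rw [innerA_range step r rw w (h rw (List.mem_cons_self)) g]
      exact ih (fun x hx => h x (List.mem_cons_of_mem _ hx)) _ _

-- bridge A's running coordinates to B's closed form: c = j + extra*z is invariant
theorem rowAux_eq_rowCl (extra r : Int) : ∀ (cells : List String) (j z : Int) g,
    rowAux (1 + extra) r cells (j + extra * z) g = rowCl extra r cells j z g := by
  intro cells
  induction cells with
  | nil => intro j z g; rfl
  | cons cell cs ih =>
      intro j z g
      simp only [rowAux, rowCl]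
      have harith : j + extra * z + (if cell == "0" then 1 + extra else 1)
          = (j + 1) + extra * (z + if cell == "0" then 1 else 0) := by
        by_cases h : cell == "0" <;> simp [h] <;> ring
      rw [harith]; exact ih _ _ _

theorem outAux_eq_outCl (extra : Int) (w : Nat) : ∀ (mp : List (List String)) (i z : Int) g,
    outAux (1 + extra) w mp (i + extra * z) g = outCl extra w mp i z g := by
  intro mp
  induction mp with
  | nil => intro i z g; rfl
  | cons rw rest ih =>
      intro i z g
      simp only [outAux, outCl]
      have harith : i + extra * z + (if PySem.List.pyGetD rw 0 "" == "0" then 1 + extra else 1)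
          = (i + 1) + extra * (z + if PySem.List.pyGetD rw 0 "" == "0" then 1 else 0) := by
        by_cases h : PySem.List.pyGetD rw 0 "" == "0" <;> simp [h] <;> ring
      rw [harith]
      have hr : rowAux (1 + extra) (i + extra * z) (rw.take w) 0 g
          = rowCl extra (i + extra * z) (rw.take w) 0 0 g := by
        have h := rowAux_eq_rowCl extra (i + extra * z) (rw.take w) 0 0 g
        simpa using h
      rw [hr]; exact ih _ _ _

-- B inner fold over a row, normalized body (full = the row truncated to width)
theorem innerB_gen (extra r : Int) (full : List String) :
    ∀ (suf pre : List String) (g : PySem.Set (Int × Int)), pre ++ suf = full →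
    (PySem.List.pyRange (pre.length : Int) ((full.length : Nat) : Int) 1).foldl
      (fun (g : PySem.Set (Int × Int)) (j : Int) =>
        if PySem.List.pyGetD full j "" == "#"
        then PySem.Set.add g (r, j + extra * (((full.take j.toNat).count "0" : Nat) : Int))
        else g) g
    = rowCl extra r suf (pre.length : Int) (((pre.count "0" : Nat) : Int)) g := by
  intro suf
  induction suf with
  | nil =>
      intro pre g hfull
      have : full.length = pre.length := by rw [← hfull]; simp
      rw [this, PySem.List.pyRange_one_eq_nil (le_refl _)]
      rfl
  | cons cell cs ih =>
      intro pre g hfull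
      have hlen : full.length = pre.length + (cs.length + 1) := by rw [← hfull]; simp
      have hlt : (pre.length : Int) < ((full.length : Nat) : Int) := by
        rw [hlen]; push_cast; omega
      rw [PySem.List.pyRange_one_cons hlt, List.foldl_cons]
      have hget : PySem.List.pyGetD full ((pre.length : Nat) : Int) "" = cell := by
        rw [PySem.List.pyGetD_natCast]
        rw [← hfull]
        simp
      have htoNat : ((pre.length : Nat) : Int).toNat = pre.length := by simp
      have htake : full.take ((pre.length : Nat) : Int).toNat = pre := by
        rw [htoNat, ← hfull]; simp
      rw [hget, htake]
      simp only [rowCl]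
      have hrec := ih (pre ++ [cell])
        (if cell == "#" then PySem.Set.add g (r, (pre.length : Int) + extra * ((pre.count "0" : Nat) : Int)) else g)
        (by rw [← hfull]; simp)
      have hlen2 : (((pre ++ [cell]).length : Nat) : Int) = (pre.length : Int) + 1 := by
        simp
      have hcnt2 : (((pre ++ [cell]).count "0" : Nat) : Int)
          = ((pre.count "0" : Nat) : Int) + (if cell == "0" then 1 else 0) := by
        by_cases h : cell == "0" <;>
          simp [List.count_append, h, List.count_singleton]
      rw [hlen2, hcnt2] at hrec
      exact hrec

-- B inner fold exactly as the port writes it, for one row of width w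
theorem innerB_row (extra r : Int) (rw : List String) (w : Nat) (hw : w ≤ rw.length)
    (g : PySem.Set (Int × Int)) :
    (PySem.List.pyRange 0 ((w : Nat) : Int) 1).foldl
      (fun (g : PySem.Set (Int × Int)) (j : Int) =>
        if PySem.List.pyGetD rw j "" == "#"
        then PySem.Set.add g (r, j + extra * (((PySem.List.slice rw (some 0) (some j)).count "0" : Nat) : Int))
        else g) g
    = rowCl extra r (rw.take w) 0 0 g := by
  have hlen : (rw.take w).length = w := by simp [hw]
  have hc := PySem.List.foldl_congr_mem
      (PySem.List.pyRange 0 ((w : Nat) : Int) 1)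
      (fun (g : PySem.Set (Int × Int)) (j : Int) =>
        if PySem.List.pyGetD rw j "" == "#"
        then PySem.Set.add g (r, j + extra * (((PySem.List.slice rw (some 0) (some j)).count "0" : Nat) : Int))
        else g)
      (fun (g : PySem.Set (Int × Int)) (j : Int) =>
        if PySem.List.pyGetD (rw.take w) j "" == "#"
        then PySem.Set.add g (r, j + extra * ((((rw.take w).take j.toNat).count "0" : Nat) : Int))
        else g)
      g
      (by
        intro acc j hj
        have hj' := (PySem.List.mem_pyRange_one).1 hj
        have h0 : 0 ≤ j := hj'.1
        have h1 : j < ((w : Nat) : Int) := hj'.2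
        have h2 : j < (rw.length : Int) := by
          have : ((w : Nat) : Int) ≤ (rw.length : Int) := by exact_mod_cast hw
          omega
        have h1' : j < ((rw.take w).length : Int) := by rw [hlen]; exact h1
        have hjw : j.toNat ≤ w := by omega
        have hsl : PySem.List.slice rw (some 0) (some j) = rw.take j.toNat := by
          rw [PySem.List.slice_zero_start, PySem.List.slice_to rw h0]
        have htk : (rw.take w).take j.toNat = rw.take j.toNat := by
          rw [List.take_take]; congr 1; omega
        simp only []
        rw [PySem.List.pyGetD_eq_getElem rw "" h0 h2,
          PySem.List.pyGetD_eq_getElem (rw.take w) "" h0 h1', hsl, htk]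
        simp [List.getElem_take])
  rw [hc]
  have hcast : ((w : Nat) : Int) = (((rw.take w).length : Nat) : Int) := by rw [hlen]
  rw [hcast]
  have := innerB_gen extra r (rw.take w) (rw.take w) [] g (by simp)
  simpa using this

-- B outer fold exactly as the port writes it
theorem outerB_gen (extra : Int) (w : Nat) (mp : List (List String))
    (hw : ∀ rw ∈ mp, w ≤ rw.length) :
    ∀ (suf pre : List (List String)) (g : PySem.Set (Int × Int)), pre ++ suf = mp →
    (PySem.List.enumerate suf (pre.length : Int)).foldl
      (fun (g : PySem.Set (Int × Int)) (p : Int × List String) =>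
        (PySem.List.pyRange 0 ((w : Nat) : Int) 1).foldl
          (fun (g : PySem.Set (Int × Int)) (j : Int) =>
            if PySem.List.pyGetD p.2 j "" == "#" then
              PySem.Set.add g
                (p.1 + extra * ((((PySem.List.slice mp (some 0) (some p.1)).map
                      (fun rw2 => PySem.List.pyGetD rw2 0 "")).count "0" : Nat) : Int),
                 j + extra * (((PySem.List.slice p.2 (some 0) (some j)).count "0" : Nat) : Int))
            else g) g) g
    = outCl extra w suf (pre.length : Int)
        (((pre.map (fun rw2 => PySem.List.pyGetD rw2 0 "")).count "0" : Nat) : Int) g := by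
  intro suf
  induction suf with
  | nil => intro pre g hmp; rfl
  | cons rw rest ih =>
      intro pre g hmp
      rw [PySem.List.enumerate_cons, List.foldl_cons]
      simp only [outCl]
      have hsl : PySem.List.slice mp (some 0) (some (pre.length : Int)) = pre := by
        rw [PySem.List.slice_zero_start, PySem.List.slice_to mp (by positivity : (0:Int) ≤ ((pre.length:Nat) : Int))]
        rw [← hmp]; simp
      have hrow : rw ∈ mp := by rw [← hmp]; simp
      have hinner := innerB_row extra
        ((pre.length : Int) + extra * (((pre.map (fun rw2 => PySem.List.pyGetD rw2 0 "")).count "0" : Nat) : Int))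
        rw w (hw rw hrow) g
      have hrec := ih (pre ++ [rw])
        (rowCl extra ((pre.length : Int) + extra * (((pre.map (fun rw2 => PySem.List.pyGetD rw2 0 "")).count "0" : Nat) : Int))
          (rw.take w) 0 0 g) (by rw [← hmp]; simp)
      have hlen2 : (((pre ++ [rw]).length : Nat) : Int) = (pre.length : Int) + 1 := by simp
      have hcnt2 : ((((pre ++ [rw]).map (fun rw2 => PySem.List.pyGetD rw2 0 "")).count "0" : Nat) : Int)
          = (((pre.map (fun rw2 => PySem.List.pyGetD rw2 0 "")).count "0" : Nat) : Int)
            + (if PySem.List.pyGetD rw 0 "" == "0" then 1 else 0) := by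
        by_cases h : PySem.List.pyGetD rw 0 "" == "0" <;>
          simp [List.count_append, h, List.count_singleton]
      rw [hlen2, hcnt2] at hrec
      rw [← hrec]
      congr 1
      simp only [hsl]
      exact hinner

theorem find_galaxies_spec : Claim_equal_find_galaxies := by
  intro map inflation_factor _ hpre
  unfold Spec_find_galaxies
  cases map with
  | nil =>
      simp [find_galaxies, find_galaxies_alt, PySem.List.enumerate,
        PySem.List.pyRange_one_eq_nil (le_refl (0 : Int))]
  | cons r0 rest =>
      have hpre' : 0 < r0.length ∧ ∀ rw ∈ r0 :: rest, r0.length ≤ rw.length := by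
        rcases hpre with h | h
        · exact absurd h (by simp)
        · simpa using h
      unfold find_galaxies find_galaxies_alt
      have hr0 : PySem.List.pyGetD (r0 :: rest) (0 : Int) ([] : List String) = r0 := by
        simp [PySem.List.pyGetD_ofNat']
      rw [hr0]
      rw [PySem.List.foldl_pyRange_zero_pyGetD' (r0 :: rest) ([] : List String)
        (fun (st : List (Int × Int) × Int) (rowi : List String) =>
          (((PySem.List.pyRange 0 ((r0.length : Nat) : Int) 1).foldl
            (fun (st2 : List (Int × Int) × Int) j =>
              (if PySem.List.pyGetD rowi j "" == "#" then PySem.Set.add st2.1 (st.2, st2.2) else st2.1,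
               st2.2 + (if PySem.List.pyGetD rowi j "" == "0" then inflation_factor - 1 else 1))) (st.1, 0)).1,
           st.2 + (if PySem.List.pyGetD rowi 0 "" == "0" then inflation_factor - 1 else 1)))
        ((PySem.Set.empty : PySem.Set (Int × Int)), 0)]
      rw [outerA_eq (inflation_factor - 1) r0.length (r0 :: rest) hpre'.2]
      have hstep : inflation_factor - 1 = 1 + (inflation_factor - 2) := by ring
      rw [hstep]
      have h0 : (0 : Int) = 0 + (inflation_factor - 2) * 0 := by ring
      rw [h0, outAux_eq_outCl (inflation_factor - 2) r0.length (r0 :: rest) 0 0 PySem.Set.empty]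
      have hB := outerB_gen (inflation_factor - 2) r0.length (r0 :: rest) hpre'.2
        (r0 :: rest) [] PySem.Set.empty (by simp)
      simpa using hB.symm
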